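-- pv_equiv track=rewrite | github.com/mmarchetti90/TXT-Encryption | TXT-Encryption_Prompt.py | generateEncoder
-- ===== SOURCE A (Python) =====
-- def generateEncoder(key, mode):
--
--     # Generating dictionary for encoding/decoding
--
--     characters = "ABCDEFGHIJKLMNOPQRSTUVWXYZabcdefghijklmnopqrstuvwxyz0123456789,.<>;:()[]{}-_=+?!@#$%^&*|/`~ "
--     indexes = [characters.index(k) for k in key]
--
--     if mode:
--
--         encoder = {char : [(characters+characters)[characters.index(char) - i] for i in indexes] for char in characters}
--
--     else:
--
--         encoder = {char : [(characters+characters)[characters.index(char) + i] for i in indexes] for char in characters}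
--
--     return encoder
-- ===== SOURCE B (Python) =====
-- def generateEncoder(key, mode):
--     characters = "ABCDEFGHIJKLMNOPQRSTUVWXYZabcdefghijklmnopqrstuvwxyz0123456789,.<>;:()[]{}-_=+?!@#$%^&*|/`~ "
--     shifts = [characters.index(k) for k in key]
--     sign = -1 if mode else 1
--     doubled = characters + characters
--     rotations = [[doubled[p + sign * i] for p in range(len(characters))] for i in shifts]
--     return {char: [rot[p] for rot in rotations] for p, char in enumerate(characters)}
-- ===== Notes on version B (the rewrite author's own statement) =====
-- stated objective: alternative
-- what changed: Instead of A's char-outer/key-inner dict comprehension that re-derives each character's index and re-concatenates characters+characters per lookup, B precomputes the shift list, the doubled alphabet once, and one rotated alphabet per key character, then assembles the encoder by transposing across the rotations at each character position.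
import Mathlib
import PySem

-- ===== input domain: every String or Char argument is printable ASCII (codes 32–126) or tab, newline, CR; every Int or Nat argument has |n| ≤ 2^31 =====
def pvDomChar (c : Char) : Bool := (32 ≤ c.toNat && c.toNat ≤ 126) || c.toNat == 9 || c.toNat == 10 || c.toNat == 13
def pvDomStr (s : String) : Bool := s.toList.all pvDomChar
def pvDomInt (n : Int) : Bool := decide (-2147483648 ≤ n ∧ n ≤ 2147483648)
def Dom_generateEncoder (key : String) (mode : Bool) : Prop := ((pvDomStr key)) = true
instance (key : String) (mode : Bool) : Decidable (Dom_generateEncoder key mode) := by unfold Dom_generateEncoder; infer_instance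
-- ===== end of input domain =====

-- B builds one rotated alphabet per key character and assembles the encoder by transposing
-- (key-outer pass, then one read across the rotations per character position) instead of A's
-- char-outer / key-inner comprehension; same return value on all admitted inputs.

-- ===== PORT A =====
-- the module's character-set string literal `characters`, as its list of chars
def pvCharacters : List Char :=
  ['A', 'B', 'C', 'D', 'E', 'F', 'G', 'H', 'I', 'J', 'K', 'L', 'M', 'N', 'O', 'P', 'Q', 'R', 'S', 'T', 'U', 'V', 'W', 'X', 'Y', 'Z', 'a', 'b', 'c', 'd', 'e', 'f', 'g', 'h', 'i', 'j', 'k', 'l', 'm', 'n', 'o', 'p', 'q', 'r', 's', 't', 'u', 'v', 'w', 'x', 'y', 'z', '0', '1', '2', '3', '4', '5', '6', '7', '8', '9', ',', '.', '<', '>', ';', ':', '(', ')', '[', ']', '{', '}', '-', '_', '=', '+', '?', '!', '@', '#', '$', '%', '^', '&', '*', '|', '/', '`', '~', ' ']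

-- literal port of A: `characters.index(x)` is PySem.List.index? on the char list (none = ValueError,
-- excluded by Pre_, so `.getD 0` is never reached; for `char in characters` the index always exists);
-- `(characters+characters)[e]` is PySem.List.pyGet? (exact, incl. negative-index wraparound).
def generateEncoder (key : String) (mode : Bool) : List (String × List String) :=
  let characters := pvCharacters
  let indexes : List Int := key.toList.map (fun k => (((PySem.List.index? characters k).getD 0 : Nat) : Int))
  if mode then
    characters.map (fun c =>
      (String.ofList [c], indexes.map (fun i =>
        String.ofList [(PySem.List.pyGet? (characters ++ characters)
          ((((PySem.List.index? characters c).getD 0 : Nat) : Int) - i)).getD ' '])))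
  else
    characters.map (fun c =>
      (String.ofList [c], indexes.map (fun i =>
        String.ofList [(PySem.List.pyGet? (characters ++ characters)
          ((((PySem.List.index? characters c).getD 0 : Nat) : Int) + i)).getD ' '])))

-- ===== PORT B =====
-- literal port of Source B: shifts, sign, doubled, rotations (one rotated alphabet per key char),
-- then the encoder assembled by transposition over enumerate(characters).
def generateEncoder_alt (key : String) (mode : Bool) : List (String × List String) :=
  let characters := pvCharacters
  let shifts : List Int := key.toList.map (fun k => (((PySem.List.index? characters k).getD 0 : Nat) : Int))
  let sign : Int := if mode then -1 else 1
  let doubled := characters ++ characters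
  let rotations : List (List Char) :=
    shifts.map (fun i => (List.range characters.length).map (fun (p : Nat) =>
      (PySem.List.pyGet? doubled ((p : Int) + sign * i)).getD ' '))
  (PySem.List.enumerate characters).map (fun pc =>
    (String.ofList [pc.2], rotations.map (fun rot =>
      String.ofList [(PySem.List.pyGet? rot pc.1).getD ' '])))

-- ===== PRECONDITION & SPEC =====
-- Pre_ excludes exactly the keys containing a character outside the module's character set,
-- on which Python A raises ValueError at characters.index(k); B raises there too.
def Pre_generateEncoder (key : String) (mode : Bool) : Prop :=
  (key.toList.all (fun c => pvCharacters.contains c)) = true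
instance (key : String) (mode : Bool) : Decidable (Pre_generateEncoder key mode) := by unfold Pre_generateEncoder; infer_instance
def pvWitness_generateEncoder : String × Bool := ("AbZ9 ~", true)

def Spec_generateEncoder (key : String) (mode : Bool) (out : List (String × List String)) : Prop := out = generateEncoder_alt key mode
instance (key : String) (mode : Bool) (out : List (String × List String)) : Decidable (Spec_generateEncoder key mode out) := by unfold Spec_generateEncoder; infer_instance

-- ===== CLAIM (what is proved, stated in full; the proofs are below) =====
def Claim_equal_generateEncoder : Prop := ∀ (key : String) (mode : Bool), Dom_generateEncoder key mode → Pre_generateEncoder key mode → Spec_generateEncoder key mode (generateEncoder key mode)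

-- ===== LEMMAS AND PROOFS =====

-- on a duplicate-free list, index-of inverts indexing
theorem pv_index_getElem (xs : List Char) (hnd : xs.Nodup) (j : Nat) (hj : j < xs.length) :
    PySem.List.index? xs xs[j] = some j := by
  have hm : xs[j] ∈ xs := List.getElem_mem hj
  obtain ⟨k, hk⟩ := Option.isSome_iff_exists.mp ((PySem.List.index?_isSome_iff xs xs[j]).mpr hm)
  obtain ⟨hkl, hxk, _⟩ := PySem.List.getElem_of_index?_eq_some hk
  have hkj : k = j := (List.Nodup.getElem_inj_iff hnd).mp hxk
  rw [hk, hkj]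

theorem pv_enum_getElem {α : Type} (xs : List α) (s : Int) (j : Nat) (hj : j < xs.length) :
    (PySem.List.enumerate xs s)[j]'(by simpa [PySem.List.length_enumerate] using hj) = (s + j, xs[j]) := by
  induction xs generalizing s j with
  | nil => simp at hj
  | cons x xs ih =>
    cases j with
    | zero => simp [PySem.List.enumerate_cons]
    | succ j =>
      have hj' : j < xs.length := Nat.lt_of_succ_lt_succ hj
      simp only [PySem.List.enumerate_cons, List.getElem_cons_succ, ih (s+1) j hj']
      congr 1
      push_cast
      ring

theorem pvCharacters_nodup : pvCharacters.Nodup := by decide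

-- the transposition identity behind the equivalence, for any shift list and sign
theorem pv_core (indexes : List Int) (sign : Int) :
    pvCharacters.map (fun c =>
      (String.ofList [c], indexes.map (fun i =>
        String.ofList [(PySem.List.pyGet? (pvCharacters ++ pvCharacters)
          ((((PySem.List.index? pvCharacters c).getD 0 : Nat) : Int) + sign * i)).getD ' '])))
    = (PySem.List.enumerate pvCharacters).map (fun pc =>
        (String.ofList [pc.2],
          (indexes.map (fun i => (List.range pvCharacters.length).map (fun (p : Nat) =>
            (PySem.List.pyGet? (pvCharacters ++ pvCharacters) ((p : Int) + sign * i)).getD ' '))).map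
            (fun rot => String.ofList [(PySem.List.pyGet? rot pc.1).getD ' ']))) := by
  apply List.ext_getElem
  · simp [PySem.List.length_enumerate]
  · intro j h1 h2
    simp only [List.length_map] at h1
    simp only [List.getElem_map, pv_enum_getElem pvCharacters 0 j h1]
    rw [pv_index_getElem pvCharacters pvCharacters_nodup j h1]
    simp only [Option.getD_some, List.map_map]
    refine Prod.ext rfl ?_
    apply List.map_congr_left
    intro i _
    simp [PySem.List.pyGet?_natCast, h1, List.getElem_map]

-- ===== VERDICT (by name: the statement is the Claim_ definition above) =====
theorem generateEncoder_spec : Claim_equal_generateEncoder := by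
  unfold Claim_equal_generateEncoder
  intro key mode _ _
  show generateEncoder key mode = generateEncoder_alt key mode
  cases mode with
  | true =>
    have h := pv_core (key.toList.map (fun k => (((PySem.List.index? pvCharacters k).getD 0 : Nat) : Int))) (-1)
    simp only [neg_one_mul, ← sub_eq_add_neg] at h
    simpa [generateEncoder, generateEncoder_alt] using h
  | false =>
    have h := pv_core (key.toList.map (fun k => (((PySem.List.index? pvCharacters k).getD 0 : Nat) : Int))) 1
    simp only [one_mul] at h
    simpa [generateEncoder, generateEncoder_alt] using h
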